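-- pv_equiv track=rewrite | github.com/m-wilkowski/cyrber-site | modules/whois_scan.py | _check_privacy
-- ===== SOURCE A (Python) =====
-- PRIVACY_KEYWORDS = [
--     "privacy", "redacted", "data protected", "whoisguard", "domains by proxy",
--     "contact privacy", "withheld", "gdpr", "not disclosed", "identity protect",
--     "whois privacy", "private registration", "domain protection",
-- ]
--
-- def _check_privacy(data: dict) -> bool:
--     """Check if WHOIS data indicates privacy protection."""
--     check_fields = ["org", "name", "registrant", "email", "registrant_name"]
--     for field in check_fields:
--         val = str(data.get(field, "") or "").lower()
--         for kw in PRIVACY_KEYWORDS: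
--             if kw in val:
--                 return True
--     return False
-- ===== SOURCE B (Python) =====
-- PRIVACY_KEYWORDS = [
--     "privacy", "redacted", "data protected", "whoisguard", "domains by proxy",
--     "contact privacy", "withheld", "gdpr", "not disclosed", "identity protect",
--     "whois privacy", "private registration", "domain protection",
-- ]
--
-- def _check_privacy(data: dict) -> bool:
--     """Check if WHOIS data indicates privacy protection."""
--     check_fields = ["org", "name", "registrant", "email", "registrant_name"]
--     # one lowercased text; '\n' occurs in no keyword, so no cross-field phantom match
--     text = "\n".join(str(data.get(f, "") or "").lower() for f in check_fields)
--     # index the keywords by first character, built once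
--     index = {}
--     for kw in PRIVACY_KEYWORDS:
--         index.setdefault(kw[0], []).append(kw)
--     # single left-to-right scan; at each position only keywords starting with that char
--     for i in range(len(text)):
--         for kw in index.get(text[i], []):
--             if text.startswith(kw, i):
--                 return True
--     return False
-- ===== Notes on version B (the rewrite author's own statement) =====
-- stated objective: alternative
-- what changed: Instead of A's per-field repeated substring search (kw in val for each of 13 keywords in each of 5 fields), B joins the fields into one lowercased text, builds a first-character hash index of the keywords once, and does a single position-by-position scan of the text, probing only the keywords whose first letter matches the current character.
import Mathlib
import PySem

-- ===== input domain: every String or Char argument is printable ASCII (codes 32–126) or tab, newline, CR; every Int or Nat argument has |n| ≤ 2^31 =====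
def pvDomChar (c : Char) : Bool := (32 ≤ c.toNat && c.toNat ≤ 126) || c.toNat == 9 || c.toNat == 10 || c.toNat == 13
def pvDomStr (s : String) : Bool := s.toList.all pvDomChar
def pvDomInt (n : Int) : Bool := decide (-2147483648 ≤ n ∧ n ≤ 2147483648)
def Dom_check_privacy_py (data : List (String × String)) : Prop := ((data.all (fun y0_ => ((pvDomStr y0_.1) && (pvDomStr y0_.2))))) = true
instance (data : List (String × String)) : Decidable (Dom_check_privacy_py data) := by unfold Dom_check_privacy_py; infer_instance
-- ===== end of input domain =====

-- B replaces A's per-field repeated substring search by a first-character index of the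
-- keywords and one position-by-position scan of the newline-joined lowercased text
-- (alternative algorithm; return value only).

def pvPrivacyKeywords : List String :=
  ["privacy", "redacted", "data protected", "whoisguard", "domains by proxy",
   "contact privacy", "withheld", "gdpr", "not disclosed", "identity protect",
   "whois privacy", "private registration", "domain protection"]

def pvCheckFields : List String := ["org", "name", "registrant", "email", "registrant_name"]

-- ===== PORT A =====
-- inner loop: for kw in PRIVACY_KEYWORDS: if kw in val: return True
def pvAInner (val : String) : List String → Bool
  | [] => false
  | kw :: rest => if PySem.Str.isIn kw val then true else pvAInner val rest

-- outer loop over check_fields (str(data.get(f,"") or "") is the lookup itself, values being strings)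
def pvAOuter (d : PySem.Dict String String) : List String → Bool
  | [] => false
  | f :: rest =>
      let val := PySem.Str.lower (d.getD f "")
      if pvAInner val pvPrivacyKeywords then true else pvAOuter d rest

def check_privacy_py (data : List (String × String)) : Bool :=
  pvAOuter (PySem.Dict.mk data) pvCheckFields

-- ===== PORT B =====
-- index.setdefault(kw[0], []).append(kw): kw[0] via pyGet? (all keywords are nonempty)
def pvIndex : PySem.Dict Char (List String) :=
  pvPrivacyKeywords.foldl
    (fun d kw =>
      match PySem.Str.pyGet? kw 0 with
      | some c => d.insert c (d.getD c [] ++ [kw])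
      | none => d)
    PySem.Dict.empty

-- for i in range(len(text)): for kw in index.get(text[i], []): if text.startswith(kw, i): …
-- exact: position i corresponds to the suffix drop i = c :: rest, and
-- text.startswith(kw, i) is the prefix test of kw on that suffix
def pvBScan (idx : PySem.Dict Char (List String)) : List Char → Bool
  | [] => false
  | c :: rest =>
      if (idx.getD c []).any (fun kw => kw.toList.isPrefixOf (c :: rest)) then true
      else pvBScan idx rest

def check_privacy_py_alt (data : List (String × String)) : Bool :=
  let d := PySem.Dict.mk data
  let text := PySem.Str.join "\n" (pvCheckFields.map (fun f => PySem.Str.lower (d.getD f "")))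
  pvBScan pvIndex text.toList

-- ===== PRECONDITION & SPEC =====
def Spec_check_privacy_py (data : List (String × String)) (out : Bool) : Prop := out = check_privacy_py_alt data
instance (data : List (String × String)) (out : Bool) : Decidable (Spec_check_privacy_py data out) := by unfold Spec_check_privacy_py; infer_instance

-- ===== CLAIM (what is proved, stated in full; the proofs are below) =====
def Claim_equal_check_privacy_py : Prop := ∀ (data : List (String × String)), Dom_check_privacy_py data → Spec_check_privacy_py data (check_privacy_py data)

-- ===== LEMMAS AND PROOFS =====

-- a prefix of u ++ c :: v avoiding c is a prefix of u
theorem pv_prefix_split (c : Char) : ∀ (sub u v : List Char), c ∉ sub →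
    sub <+: u ++ c :: v → sub <+: u := by
  intro sub
  induction sub with
  | nil => intro u v _ _; exact List.nil_prefix
  | cons s sub' ih =>
    intro u v hc h
    cases u with
    | nil =>
      simp only [List.nil_append, List.cons_prefix_cons] at h
      exact absurd (h.1 ▸ List.mem_cons_self) hc
    | cons y u' =>
      simp only [List.cons_append, List.cons_prefix_cons] at h ⊢
      exact ⟨h.1, ih u' v (fun hm => hc (List.mem_cons_of_mem _ hm)) h.2⟩

-- an infix of a ++ c :: b avoiding c lies inside a or inside b
theorem pv_infix_split (c : Char) (sub : List Char) (hc : c ∉ sub) :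
    ∀ (a b : List Char), (sub <:+: a ++ c :: b ↔ sub <:+: a ∨ sub <:+: b) := by
  intro a
  induction a with
  | nil =>
    intro b
    constructor
    · intro h
      rcases List.infix_cons_iff.mp h with hp | hi
      · left
        have := pv_prefix_split c sub [] b hc (by simpa using hp)
        simpa using List.IsPrefix.isInfix this
      · exact Or.inr hi
    · rintro (h | h)
      · exact (List.infix_nil.mp h) ▸ List.nil_infix
      · exact List.infix_cons h
  | cons x a' ih =>
    intro b
    constructor
    · intro h
      rcases List.infix_cons_iff.mp h with hp | hi
      · have hpre : sub <+: x :: a' :=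
          pv_prefix_split c sub (x :: a') b hc (by simpa using hp)
        exact Or.inl hpre.isInfix
      · rcases (ih b).mp hi with ha | hb
        · exact Or.inl (List.infix_cons ha)
        · exact Or.inr hb
    · rintro (h | h)
      · exact h.trans ((x :: a').prefix_append (c :: b)).isInfix
      · exact List.infix_cons ((ih b).mpr (Or.inr h))

-- keyword search distributes over a '\n'-join when the keyword has no '\n'
theorem pv_isIn_join (sub : List Char) (hc : '\n' ∉ sub) :
    ∀ (ps : List (List Char)) (p : List Char),
      PySem.Chars.isIn sub (PySem.Chars.join ['\n'] (p :: ps)) =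
        (p :: ps).any (fun q => PySem.Chars.isIn sub q) := by
  intro ps
  induction ps with
  | nil => intro p; simp [PySem.Chars.join_singleton]
  | cons q ps' ih =>
    intro p
    rw [PySem.Chars.join_cons_cons]
    have hsplit := pv_infix_split '\n' sub hc p (PySem.Chars.join ['\n'] (q :: ps'))
    have harr : p ++ ['\n'] ++ PySem.Chars.join ['\n'] (q :: ps')
        = p ++ '\n' :: PySem.Chars.join ['\n'] (q :: ps') := by simp
    rw [harr]
    cases hl : PySem.Chars.isIn sub (p ++ '\n' :: PySem.Chars.join ['\n'] (q :: ps')) with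
    | true =>
      rcases hsplit.mp ((PySem.Chars.isIn_iff_infix sub _).mp hl) with h | h
      · have h1 : PySem.Chars.isIn sub p = true := (PySem.Chars.isIn_iff_infix sub p).mpr h
        simp [List.any_cons, h1]
      · have h2 : PySem.Chars.isIn sub (PySem.Chars.join ['\n'] (q :: ps')) = true :=
          (PySem.Chars.isIn_iff_infix sub _).mpr h
        have h3 := (ih q).symm.trans h2
        simp only [List.any_cons] at h3 ⊢
        simp [h3]
    | false =>
      have hni := (PySem.Chars.isIn_eq_false_iff sub _).mp hl
      have h1 : PySem.Chars.isIn sub p = false :=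
        (PySem.Chars.isIn_eq_false_iff sub p).mpr (fun h => hni (hsplit.mpr (Or.inl h)))
      have h2 : PySem.Chars.isIn sub (PySem.Chars.join ['\n'] (q :: ps')) = false :=
        (PySem.Chars.isIn_eq_false_iff sub _).mpr (fun h => hni (hsplit.mpr (Or.inr h)))
      have h3 := (ih q).symm.trans h2
      simp only [List.any_cons] at h3 ⊢
      simp [h1, h3]

-- A's inner loop is an any over the keywords
theorem pv_inner_eq_any (val : String) : ∀ kws : List String,
    pvAInner val kws = kws.any (fun kw => PySem.Str.isIn kw val) := by
  intro kws
  induction kws with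
  | nil => rfl
  | cons kw rest ih =>
    rw [pvAInner, List.any_cons, ih]
    cases h : PySem.Str.isIn kw val <;> simp

-- A's outer loop is an any over the fields
theorem pv_outer_eq_any (d : PySem.Dict String String) : ∀ fs : List String,
    pvAOuter d fs = fs.any (fun f =>
      pvPrivacyKeywords.any (fun kw => PySem.Str.isIn kw (PySem.Str.lower (d.getD f "")))) := by
  intro fs
  induction fs with
  | nil => rfl
  | cons f rest ih =>
    rw [pvAOuter, List.any_cons, ih, pv_inner_eq_any]
    cases h : pvPrivacyKeywords.any (fun kw => PySem.Str.isIn kw (PySem.Str.lower (d.getD f ""))) <;> simp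

-- the index as a literal dict (fold evaluated once)
theorem pv_index_eval : pvIndex = PySem.Dict.mk
    [('p', ["privacy", "private registration"]),
     ('r', ["redacted"]),
     ('d', ["data protected", "domains by proxy", "domain protection"]),
     ('w', ["whoisguard", "withheld", "whois privacy"]),
     ('c', ["contact privacy"]),
     ('g', ["gdpr"]),
     ('n', ["not disclosed"]),
     ('i', ["identity protect"])] := by decide

-- at a position starting with c, probing only the keywords indexed under c is complete
theorem pv_index_complete (c : Char) (rest : List Char) :
    ((pvIndex.getD c []).any (fun kw => kw.toList.isPrefixOf (c :: rest))) =
      (pvPrivacyKeywords.any (fun kw => kw.toList.isPrefixOf (c :: rest))) := by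
  rw [pv_index_eval]
  by_cases h1 : c = 'p'; · subst h1; simp [pvPrivacyKeywords, PySem.Dict.getD, PySem.Dict.get?, List.isPrefixOf]
  by_cases h2 : c = 'r'; · subst h2; simp [pvPrivacyKeywords, PySem.Dict.getD, PySem.Dict.get?, List.isPrefixOf]
  by_cases h3 : c = 'd'; · subst h3; simp [pvPrivacyKeywords, PySem.Dict.getD, PySem.Dict.get?, List.isPrefixOf]
  by_cases h4 : c = 'w'; · subst h4; simp [pvPrivacyKeywords, PySem.Dict.getD, PySem.Dict.get?, List.isPrefixOf]
  by_cases h5 : c = 'c'; · subst h5; simp [pvPrivacyKeywords, PySem.Dict.getD, PySem.Dict.get?, List.isPrefixOf]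
  by_cases h6 : c = 'g'; · subst h6; simp [pvPrivacyKeywords, PySem.Dict.getD, PySem.Dict.get?, List.isPrefixOf]
  by_cases h7 : c = 'n'; · subst h7; simp [pvPrivacyKeywords, PySem.Dict.getD, PySem.Dict.get?, List.isPrefixOf]
  by_cases h8 : c = 'i'; · subst h8; simp [pvPrivacyKeywords, PySem.Dict.getD, PySem.Dict.get?, List.isPrefixOf]
  have e1 : ('p' == c) = false := by simp [Ne.symm h1]
  have e2 : ('r' == c) = false := by simp [Ne.symm h2]
  have e3 : ('d' == c) = false := by simp [Ne.symm h3]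
  have e4 : ('w' == c) = false := by simp [Ne.symm h4]
  have e5 : ('c' == c) = false := by simp [Ne.symm h5]
  have e6 : ('g' == c) = false := by simp [Ne.symm h6]
  have e7 : ('n' == c) = false := by simp [Ne.symm h7]
  have e8 : ('i' == c) = false := by simp [Ne.symm h8]
  simp [pvPrivacyKeywords, PySem.Dict.getD, List.isPrefixOf, PySem.Dict.get?, e1, e2, e3, e4, e5, e6, e7, e8]

-- the scan finds a keyword iff some keyword is an infix of the text
theorem pv_scan_eq_any : ∀ l : List Char,
    pvBScan pvIndex l = pvPrivacyKeywords.any (fun kw => PySem.Chars.isIn kw.toList l) := by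
  intro l
  induction l with
  | nil => decide
  | cons c rest ih =>
    rw [pvBScan, pv_index_complete]
    rw [Bool.eq_iff_iff]
    constructor
    · intro h
      split_ifs at h with hp
      · rw [List.any_eq_true] at hp ⊢
        obtain ⟨kw, hkw, hpre⟩ := hp
        exact ⟨kw, hkw, (PySem.Chars.isIn_iff_infix _ _).mpr
          (List.IsPrefix.isInfix (List.isPrefixOf_iff_prefix.mp hpre))⟩
      · rw [ih, List.any_eq_true] at h
        obtain ⟨kw, hkw, hin⟩ := h
        rw [List.any_eq_true]
        exact ⟨kw, hkw, (PySem.Chars.isIn_iff_infix _ _).mpr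
          (List.infix_cons ((PySem.Chars.isIn_iff_infix _ _).mp hin))⟩
    · intro h
      rw [List.any_eq_true] at h
      obtain ⟨kw, hkw, hin⟩ := h
      rcases List.infix_cons_iff.mp ((PySem.Chars.isIn_iff_infix _ _).mp hin) with hp | hi
      · have : (pvPrivacyKeywords.any (fun kw => kw.toList.isPrefixOf (c :: rest))) = true := by
          rw [List.any_eq_true]
          exact ⟨kw, hkw, List.isPrefixOf_iff_prefix.mpr hp⟩
        simp [this]
      · have hrest : pvBScan pvIndex rest = true := by
          rw [ih, List.any_eq_true]
          exact ⟨kw, hkw, (PySem.Chars.isIn_iff_infix _ _).mpr hi⟩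
        split_ifs <;> simp [hrest]

-- ===== VERDICT (by name: the statement is the Claim_ definition above) =====
theorem check_privacy_py_spec : Claim_equal_check_privacy_py := by
  intro data _
  unfold Spec_check_privacy_py check_privacy_py check_privacy_py_alt
  set d := PySem.Dict.mk data with hd
  rw [pv_outer_eq_any, pv_scan_eq_any]
  show _ = pvPrivacyKeywords.any (fun kw => PySem.Chars.isIn kw.toList
      (PySem.Str.join "\n" (pvCheckFields.map (fun f => PySem.Str.lower (d.getD f "")))).toList)
  obtain ⟨v1, v2, v3, v4, v5, hv⟩ :
      ∃ v1 v2 v3 v4 v5, (pvCheckFields.map (fun f => PySem.Str.lower (d.getD f ""))) = [v1, v2, v3, v4, v5] :=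
    ⟨_, ⟨_, ⟨_, ⟨_, ⟨_, rfl⟩⟩⟩⟩⟩
  have hjoin : ∀ kw : String, '\n' ∉ kw.toList →
      PySem.Chars.isIn kw.toList (PySem.Str.join "\n" [v1, v2, v3, v4, v5]).toList =
        [v1, v2, v3, v4, v5].any (fun v => PySem.Str.isIn kw v) := by
    intro kw hkw
    rw [PySem.Str.toList_join]
    rw [show ("\n" : String).toList = ['\n'] from rfl]
    rw [show ([v1, v2, v3, v4, v5].map String.toList) =
        v1.toList :: [v2.toList, v3.toList, v4.toList, v5.toList] from rfl]
    rw [pv_isIn_join kw.toList hkw [v2.toList, v3.toList, v4.toList, v5.toList] v1.toList]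
    simp
  rw [hv]
  have hAll : ∀ kw ∈ pvPrivacyKeywords, '\n' ∉ kw.toList := by decide
  rw [Bool.eq_iff_iff]
  simp only [List.any_eq_true]
  constructor
  · rintro ⟨f, hf, kw, hkw, hin⟩
    refine ⟨kw, hkw, ?_⟩
    rw [hjoin kw (hAll kw hkw), List.any_eq_true]
    exact ⟨PySem.Str.lower (d.getD f ""), by rw [← hv]; exact List.mem_map_of_mem hf, hin⟩
  · rintro ⟨kw, hkw, hin⟩
    rw [hjoin kw (hAll kw hkw), List.any_eq_true] at hin
    obtain ⟨v, hvmem, hin⟩ := hin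
    rw [← hv, List.mem_map] at hvmem
    obtain ⟨f, hf, rfl⟩ := hvmem
    exact ⟨f, hf, kw, hkw, hin⟩
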